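-- pv_equiv track=rewrite | github.com/blevergood/Advent-of-Code | 2023/Day 12 - Hot Springs/spring_possibilities.py | get_possible_strings
-- ===== SOURCE A (Python) =====
-- def get_possible_strings(
--     rows: list[str], index_permutations: list[list[tuple[int]]]
-- ) -> list[list[str]]:
--     possible_strings = []
--     for i in range(len(rows)):
--         row_strings = []
--         for combo in index_permutations[i]:
--             string_builder = list(rows[i])
--             for index in combo:
--                 string_builder[index] = "#"
--             current_string = "".join(string_builder)
--             current_string = current_string.replace("?", ".")
--             row_strings.append(current_string)
--         possible_strings.append(row_strings)
--
--     return possible_strings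
-- ===== SOURCE B (Python) =====
-- def absolute_positions(indices, length):
--     # resolve each (possibly negative) index to its absolute position, range-checked
--     positions = range(length)
--     return sorted({positions[i] for i in indices})
--
--
-- def get_possible_strings(rows, index_permutations):
--     result = []
--     for row, combos in zip(rows, index_permutations):
--         base = row.replace("?", ".")
--         row_out = []
--         for combo in combos:
--             pieces = []
--             prev = 0
--             for p in absolute_positions(combo, len(row)):
--                 pieces.append(base[prev:p])
--                 pieces.append("#")
--                 prev = p + 1
--             pieces.append(base[prev:])
--             row_out.append("".join(pieces))
--         result.append(row_out)
--     return result
-- ===== Notes on version B (the rewrite author's own statement) =====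
-- stated objective: alternative
-- what changed: B hoists the '?'->'.' replacement out of the combo loop (done once per row) and then assembles each combo's string by segment splicing: it sorts the deduplicated normalized mark positions and concatenates untouched slices of the dotted base string with '#' separators, instead of A's per-combo copy-to-char-list, overwrite-each-index, join, then replace passes; Pre_ excludes the inputs where A raises IndexError (fewer combo lists than rows, or an index outside [-len(row), len(row))).
import Mathlib
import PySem

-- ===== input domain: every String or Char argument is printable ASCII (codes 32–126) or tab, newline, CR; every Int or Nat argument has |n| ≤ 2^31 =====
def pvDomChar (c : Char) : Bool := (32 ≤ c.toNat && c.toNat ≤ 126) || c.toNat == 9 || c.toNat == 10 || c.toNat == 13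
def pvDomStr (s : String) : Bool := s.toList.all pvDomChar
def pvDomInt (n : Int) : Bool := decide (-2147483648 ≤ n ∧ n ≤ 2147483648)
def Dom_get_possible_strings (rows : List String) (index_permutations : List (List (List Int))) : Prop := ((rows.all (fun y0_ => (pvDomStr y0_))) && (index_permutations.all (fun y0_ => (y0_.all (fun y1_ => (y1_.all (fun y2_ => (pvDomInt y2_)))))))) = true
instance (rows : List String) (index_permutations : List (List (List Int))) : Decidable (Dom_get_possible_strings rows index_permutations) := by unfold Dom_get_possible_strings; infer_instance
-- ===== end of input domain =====

-- B hoists the '?'->'.' replacement out of the combo loop (once per row) and assembles each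
-- combo's string by splicing slices of that dotted base around '#' at the sorted deduplicated
-- normalized mark positions, instead of A's copy/overwrite/join/replace per combo; alternative
-- decomposition, same cost.


-- ===== PORT A =====
def get_possible_strings (rows : List String) (index_permutations : List (List (List Int))) : List (List String) :=
  (PySem.List.pyRange 0 rows.length 1).foldl (fun possible_strings i =>
    let row_strings := (PySem.List.pyGetD index_permutations i []).foldl (fun row_strings combo =>
      let string_builder := (PySem.List.pyGetD rows i "").toList
      let string_builder := combo.foldl (fun sb index => PySem.List.pySetD sb index '#') string_builder
      let current_string := String.ofList string_builder
      let current_string := PySem.Str.replace current_string "?" "."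
      row_strings ++ [current_string]) []
    possible_strings ++ [row_strings]) []

-- ===== PORT B =====
def absolute_positions (indices : List Int) (length : Int) : List Int :=
  let positions := PySem.List.pyRange 0 length 1
  PySem.List.sorted
    (PySem.Set.ofList (indices.map (fun i => PySem.List.pyGetD positions i 0))) (fun x => x) false

def get_possible_strings_alt (rows : List String) (index_permutations : List (List (List Int))) : List (List String) :=
  (rows.zip index_permutations).foldl (fun result rc =>
    let base := PySem.Str.replace rc.1 "?" "."
    let row_out := rc.2.foldl (fun row_out combo =>
      let positions := absolute_positions combo (PySem.Str.len rc.1)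
      let st := positions.foldl (fun (st : List String × Int) p =>
        (st.1 ++ [PySem.Str.slice base (some st.2) (some p), "#"], p + 1))
        (([] : List String), (0 : Int))
      row_out ++ [PySem.Str.join "" (st.1 ++ [PySem.Str.slice base (some st.2) none])]) []
    result ++ [row_out]) []

-- ===== PRECONDITION & SPEC =====
-- Pre_ excludes exactly the inputs where the Python A raises an IndexError: fewer combo
-- lists than rows, or a combo index outside [-len(row), len(row)) for its row.
def Pre_get_possible_strings (rows : List String) (index_permutations : List (List (List Int))) : Prop :=
  rows.length ≤ index_permutations.length ∧
  ∀ p ∈ PySem.List.enumerate rows,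
    ∀ combo ∈ PySem.List.pyGetD index_permutations p.1 [],
      ∀ idx ∈ combo, PySem.Raise.InRange p.2.toList.length idx
instance (rows : List String) (index_permutations : List (List (List Int))) : Decidable (Pre_get_possible_strings rows index_permutations) := by unfold Pre_get_possible_strings; infer_instance

def pvWitness_get_possible_strings : List String × List (List (List Int)) :=
  (["?#?.", "??"], [[[0, 2], [-1]], [[1], []]])

def Spec_get_possible_strings (rows : List String) (index_permutations : List (List (List Int))) (out : List (List String)) : Prop := out = get_possible_strings_alt rows index_permutations
instance (rows : List String) (index_permutations : List (List (List Int))) (out : List (List String)) : Decidable (Spec_get_possible_strings rows index_permutations out) := by unfold Spec_get_possible_strings; infer_instance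

-- ===== CLAIM (what is proved, stated in full; the proofs are below) =====
def Claim_equal_get_possible_strings : Prop := ∀ (rows : List String) (index_permutations : List (List (List Int))), Dom_get_possible_strings rows index_permutations → Pre_get_possible_strings rows index_permutations → Spec_get_possible_strings rows index_permutations (get_possible_strings rows index_permutations)

-- ===== LEMMAS AND PROOFS =====

-- 'c if it is not "?", else "."': the effect of Python's s.replace("?", ".") on one character
def qfix (c : Char) : Char := if c = '?' then '.' else c

theorem go_eq (fuel : Nat) (l acc : List Char) (h : l.length ≤ fuel) :
    PySem.Chars.replace.go ['?'] ['.'] fuel l acc = acc.reverse ++ l.map qfix := by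
  induction fuel generalizing l acc with
  | zero => cases l with
    | nil => simp [PySem.Chars.replace.go]
    | cons c t => simp at h
  | succ n ih =>
    cases l with
    | nil => simp [PySem.Chars.replace.go]
    | cons c t =>
      simp only [List.length_cons, Nat.add_le_add_iff_right] at h
      by_cases hc : c = '?'
      · subst hc
        have : List.isPrefixOf ['?'] ('?' :: t) = true := by simp [List.isPrefixOf]
        simp [PySem.Chars.replace.go, this, ih _ _ h, qfix]
      · have : List.isPrefixOf ['?'] (c :: t) = false := by
          simp [List.isPrefixOf]; exact fun h' => hc h'.symm
        simp [PySem.Chars.replace.go, this, ih _ _ h, qfix, hc]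

theorem replace_eq (cs : List Char) :
    PySem.Chars.replace cs ['?'] ['.'] = cs.map qfix := by
  simp [PySem.Chars.replace, go_eq cs.length cs [] le_rfl]

theorem setD_getElem? (sb : List Char) (idx : Int)
    (h : PySem.Raise.InRange sb.length idx) (k : Nat) :
    (PySem.List.pySetD sb idx '#')[k]? =
      if PySem.Int.mod idx (sb.length : Int) = (k : Int) then some '#' else sb[k]? := by
  obtain ⟨h1, h2⟩ := h
  have hn : 0 < sb.length := by omega
  have hmod : PySem.Int.mod idx (sb.length : Int) = idx % (sb.length : Int) :=
    PySem.Int.mod_eq_emod_of_pos (by exact_mod_cast hn)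
  by_cases hpos : 0 ≤ idx
  · have : idx % (sb.length : Int) = idx := Int.emod_eq_of_lt hpos h2
    rw [PySem.List.pySetD_of_nonneg sb '#' hpos, hmod, this]
    rw [List.getElem?_set]
    by_cases he : idx = (k : Int)
    · have : idx.toNat = k := by omega
      simp [he]; omega
    · have : idx.toNat ≠ k := by omega
      simp [this, he]
  · replace hpos : idx < 0 := by omega
    have hval : idx % (sb.length : Int) = idx + sb.length := by
      have h3 : (idx + sb.length) % (sb.length : Int) = idx % (sb.length : Int) := by
        simp
      rw [← h3]; exact Int.emod_eq_of_lt (by omega) (by omega)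
    have hset : PySem.List.pySetD sb idx '#' = sb.set (sb.length - (-idx).toNat) '#' := by
      simp [PySem.List.pySetD, PySem.List.pySet?, PySem.List.pyIdx?, hpos.not_ge, h1]
    rw [hset, hmod, hval, List.getElem?_set]
    by_cases he : idx + (sb.length : Int) = (k : Int)
    · have : sb.length - (-idx).toNat = k := by omega
      simp [this, he]; omega
    · have : sb.length - (-idx).toNat ≠ k := by omega
      simp [this, he]

theorem foldl_set_getElem? (combo : List Int) (sb : List Char)
    (h : ∀ idx ∈ combo, PySem.Raise.InRange sb.length idx) (k : Nat) :
    (combo.foldl (fun sb index => PySem.List.pySetD sb index '#') sb)[k]? =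
      if ∃ j ∈ combo, PySem.Int.mod j (sb.length : Int) = (k : Int) then some '#'
      else sb[k]? := by
  induction combo generalizing sb with
  | nil => simp
  | cons idx rest ih =>
    have hidx := h idx (by simp)
    have hlen : (PySem.List.pySetD sb idx '#').length = sb.length :=
      PySem.List.length_pySetD sb idx '#'
    rw [List.foldl_cons, ih (PySem.List.pySetD sb idx '#')
      (by rw [hlen]; exact fun j hj => h j (List.mem_cons_of_mem _ hj))]
    rw [hlen, setD_getElem? sb idx hidx k]
    by_cases hrest : ∃ j ∈ rest, PySem.Int.mod j (sb.length : Int) = (k : Int)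
    · simp [hrest]
    · by_cases hfst : PySem.Int.mod idx (sb.length : Int) = (k : Int)
      · simp [hrest, hfst]
      · simp [hrest, hfst]

-- ''.join(parts) is concatenation
theorem join_empty_flatten (parts : List (List Char)) :
    PySem.Chars.join [] parts = parts.flatten := by
  induction parts with
  | nil => simp [PySem.Chars.join_nil]
  | cons p rest ih =>
    cases rest with
    | nil => simp [PySem.Chars.join_singleton]
    | cons q t => rw [PySem.Chars.join_cons_cons]; simp at ih ⊢; rw [ih]

-- the splice built by B's inner loop, as a recursion over the sorted positions
def spliceList (base : List Char) : Nat → List Int → List Char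
  | prev, [] => base.drop prev
  | prev, p :: ps => (base.drop prev).take (p.toNat - prev) ++ '#' :: spliceList base (p.toNat + 1) ps

theorem fold_pieces (base : String) (ps : List Int) (acc : List String) (prev : Int)
    (h0 : 0 ≤ prev) (hlb : ∀ p ∈ ps, prev ≤ p) (hs : ps.Pairwise (· < ·)) :
    (PySem.Str.join ""
      ((ps.foldl (fun (st : List String × Int) p =>
          (st.1 ++ [PySem.Str.slice base (some st.2) (some p), "#"], p + 1)) (acc, prev)).1 ++
        [PySem.Str.slice base
          (some (ps.foldl (fun (st : List String × Int) p =>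
            (st.1 ++ [PySem.Str.slice base (some st.2) (some p), "#"], p + 1)) (acc, prev)).2)
          none])).toList =
      ((acc.map String.toList).flatten) ++ spliceList base.toList prev.toNat ps := by
  induction ps generalizing acc prev with
  | nil =>
    simp only [List.foldl_nil, spliceList]
    rw [PySem.Str.toList_join, show ("" : String).toList = ([] : List Char) from rfl,
      join_empty_flatten]
    simp [PySem.List.slice_from base.toList h0]
  | cons p t ih =>
    have hp : prev ≤ p := hlb p (by simp)
    have hp0 : (0:Int) ≤ p := le_trans h0 hp
    rw [List.foldl_cons, ih (acc ++ [PySem.Str.slice base (some prev) (some p), "#"]) (p + 1)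
      (by omega)
      (fun q hq => by have := (List.pairwise_cons.mp hs).1 q hq; omega)
      (List.pairwise_cons.mp hs).2]
    have hsplice : spliceList base.toList prev.toNat (p :: t) =
        (base.toList.drop prev.toNat).take (p.toNat - prev.toNat) ++
          '#' :: spliceList base.toList (p.toNat + 1) t := by
      simp only [spliceList]
    rw [hsplice]
    have h1 : (p + 1).toNat = p.toNat + 1 := by omega
    rw [h1]
    simp only [List.map_append, List.flatten_append]
    have hslice : (PySem.Str.slice base (some prev) (some p)).toList =
        (base.toList.drop prev.toNat).take (p.toNat - prev.toNat) := by
      simp [PySem.List.slice_toNat base.toList h0 hp0]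
    simp [hslice]

theorem spliceList_eq (base : List Char) (ps : List Int) (prev : Nat)
    (hs : ps.Pairwise (· < ·)) (hlb : ∀ p ∈ ps, (prev : Int) ≤ p)
    (hub : ∀ p ∈ ps, p < (base.length : Int)) :
    spliceList base prev ps =
      ((base.drop prev).zipIdx prev).map
        (fun ci => if (ci.2 : Int) ∈ ps then '#' else ci.1) := by
  induction ps generalizing prev with
  | nil =>
    simp only [spliceList, List.not_mem_nil, if_false]
    exact (List.zipIdx_map_fst prev (base.drop prev)).symm
  | cons p t ih =>
    have hp : (prev : Int) ≤ p := hlb p (by simp)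
    have hpl : p < (base.length : Int) := hub p (by simp)
    have hplN : p.toNat < base.length := by omega
    have hprevle : prev ≤ p.toNat := by omega
    -- split drop prev into the part before p, the element at p, and the rest
    have hdecomp : base.drop prev =
        (base.drop prev).take (p.toNat - prev) ++ base[p.toNat] :: base.drop (p.toNat + 1) := by
      conv_lhs => rw [← List.take_append_drop (p.toNat - prev) (base.drop prev)]
      congr 1
      rw [List.drop_drop, show prev + (p.toNat - prev) = p.toNat by omega]
      exact (List.getElem_cons_drop hplN).symm
    rw [spliceList]
    conv_rhs => rw [hdecomp]
    rw [List.zipIdx_append, List.map_append]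
    have hlen : ((base.drop prev).take (p.toNat - prev)).length = p.toNat - prev := by
      rw [List.length_take, List.length_drop]; omega
    rw [hlen]
    have hfirst : (((base.drop prev).take (p.toNat - prev)).zipIdx prev).map
        (fun ci => if (ci.2 : Int) ∈ p :: t then '#' else ci.1) =
        (base.drop prev).take (p.toNat - prev) := by
      have hcg : ∀ ci ∈ ((base.drop prev).take (p.toNat - prev)).zipIdx prev,
          (if (ci.2 : Int) ∈ p :: t then '#' else ci.1) = ci.1 := by
        intro ci hci
        have hbound := List.snd_lt_add_of_mem_zipIdx hci
        rw [hlen] at hbound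
        have hne : ¬ ((ci.2 : Int) ∈ p :: t) := by
          intro hmem
          rcases List.mem_cons.mp hmem with hh | hh
          · omega
          · have := (List.pairwise_cons.mp hs).1 _ hh; omega
        simp [hne]
      rw [List.map_congr_left hcg]
      exact List.zipIdx_map_fst prev _
    rw [hfirst]
    have hsecond : (base[p.toNat] :: base.drop (p.toNat + 1)).zipIdx (prev + (p.toNat - prev)) =
        (base[p.toNat], p.toNat) :: (base.drop (p.toNat + 1)).zipIdx (p.toNat + 1) := by
      have : prev + (p.toNat - prev) = p.toNat := by omega
      rw [this, List.zipIdx_cons]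
    rw [hsecond, List.map_cons]
    have hpmem : ((p.toNat : Int)) ∈ p :: t := by
      have : (p.toNat : Int) = p := by omega
      rw [this]; exact List.mem_cons_self
    rw [if_pos hpmem]
    congr 1
    rw [ih (p.toNat + 1) (List.pairwise_cons.mp hs).2
      (fun q hq => by have := (List.pairwise_cons.mp hs).1 q hq; omega)
      (fun q hq => hub q (List.mem_cons_of_mem _ hq))]
    congr 1
    apply List.map_congr_left
    intro ci hci
    have hbound := List.le_snd_of_mem_zipIdx hci
    have hne : (ci.2 : Int) ≠ p := by omega
    by_cases hmem : (ci.2 : Int) ∈ t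
    · simp [hmem, List.mem_cons, hne]
    · simp [hmem, List.mem_cons, hne]

-- the two per-combo builders, named for the proofs (definitionally the ports' inner bodies)
def aCombo (row : String) (combo : List Int) : String :=
  PySem.Str.replace (String.ofList (combo.foldl
    (fun sb index => PySem.List.pySetD sb index '#') row.toList)) "?" "."

def altCombo (row : String) (combo : List Int) : String :=
  let base := PySem.Str.replace row "?" "."
  let positions := absolute_positions combo (PySem.Str.len row)
  let st := positions.foldl (fun (st : List String × Int) p =>
    (st.1 ++ [PySem.Str.slice base (some st.2) (some p), "#"], p + 1))
    (([] : List String), (0 : Int))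
  PySem.Str.join "" (st.1 ++ [PySem.Str.slice base (some st.2) none])

-- range(n)[j] is j normalized modulo n, for an in-range j
theorem idx_norm (n : Nat) (j : Int) (h : PySem.Raise.InRange n j) :
    PySem.List.pyGetD (PySem.List.pyRange 0 (n : Int) 1) j 0 = PySem.Int.mod j (n : Int) := by
  obtain ⟨h1, h2⟩ := h
  have hn : 0 < n := by omega
  have hmod : PySem.Int.mod j (n : Int) = j % (n : Int) :=
    PySem.Int.mod_eq_emod_of_pos (by exact_mod_cast hn)
  unfold PySem.List.pyGetD PySem.List.pyGet?
  rw [PySem.List.length_pyRange_one]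
  unfold PySem.List.pyIdx?
  rw [hmod]
  by_cases hp : 0 ≤ j
  · rw [if_pos hp, if_pos (by omega : j < ((((n : Int) - 0).toNat : Nat) : Int))]
    rw [Option.bind_some]
    rw [PySem.List.getElem?_pyRange_one, if_pos (by omega : j.toNat < ((n : Int) - 0).toNat)]
    rw [Int.emod_eq_of_lt hp h2]
    simp; omega
  · rw [if_neg hp, if_pos (by omega : -((((n : Int) - 0).toNat : Nat) : Int) ≤ j)]
    rw [Option.bind_some]
    rw [PySem.List.getElem?_pyRange_one,
        if_pos (by omega : ((n : Int) - 0).toNat - (-j).toNat < ((n : Int) - 0).toNat)]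
    have hval : j % (n : Int) = j + n := by
      have h3 : (j + n) % (n : Int) = j % (n : Int) := by
        simp
      rw [← h3]; exact Int.emod_eq_of_lt (by omega) (by omega)
    rw [hval]
    simp; omega

-- B's per-combo string, characterized positionwise
theorem mark_row_alt_eq (row : String) (combo : List Int)
    (h : ∀ idx ∈ combo, PySem.Raise.InRange row.toList.length idx) :
    (altCombo row combo).toList =
    row.toList.zipIdx.map
      (fun ci => if ∃ j ∈ combo, PySem.Int.mod j (row.toList.length : Int) = (ci.2 : Int)
        then '#' else qfix ci.1) := by
  simp only [altCombo, absolute_positions]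
  have hlen : PySem.Str.len row = ((row.toList.length : Nat) : Int) := by simp
  rw [hlen]
  have hmap : combo.map (fun j =>
      PySem.List.pyGetD (PySem.List.pyRange 0 ((row.toList.length : Nat) : Int) 1) j 0) =
      combo.map (fun j => PySem.Int.mod j ((row.toList.length : Nat) : Int)) :=
    List.map_congr_left (fun j hj => idx_norm row.toList.length j (h j hj))
  rw [hmap]
  set n : Int := ((row.toList.length : Nat) : Int) with hn
  have hnval : n = (row.toList.length : Int) := rfl
  set ps := PySem.List.sorted
      (PySem.Set.ofList (combo.map (fun j => PySem.Int.mod j n))) (fun x => x) false with hps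
  have hsorted : ps.Pairwise (· < ·) := PySem.List.sorted_ofList_pairwise_lt _
  have hmemps : ∀ q, q ∈ ps ↔ ∃ j ∈ combo, PySem.Int.mod j n = q := by
    intro q
    rw [hps, PySem.List.mem_sorted, PySem.Set.mem_ofList, List.mem_map]
  have hbounds : ∀ q ∈ ps, 0 ≤ q ∧ q < n := by
    intro q hq
    obtain ⟨j, hj, rfl⟩ := (hmemps q).mp hq
    obtain ⟨ha, hb⟩ := h j hj
    have hpos : (0:Int) < n := by omega
    exact ⟨PySem.Int.mod_nonneg j hpos, PySem.Int.mod_lt j hpos⟩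
  rw [fold_pieces _ ps [] 0 le_rfl (fun p hp => (hbounds p hp).1) hsorted]
  have hbase : (PySem.Str.replace row "?" ".").toList = row.toList.map qfix := by
    simpa using replace_eq row.toList
  rw [hbase, show (0 : Int).toNat = 0 from rfl]
  rw [spliceList_eq _ ps 0 hsorted (fun p hp => by exact_mod_cast (hbounds p hp).1)
    (fun p hp => by rw [List.length_map, ← hnval]; exact (hbounds p hp).2)]
  simp only [List.map_nil, List.flatten_nil, List.nil_append, List.drop_zero]
  rw [List.zipIdx_map, List.map_map]
  apply List.map_congr_left
  intro ci _
  simp only [Function.comp_apply, Prod.map_fst, Prod.map_snd, id_eq]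
  by_cases hc : ∃ j ∈ combo, PySem.Int.mod j n = (ci.2 : Int)
  · rw [if_pos ((hmemps _).mpr hc), if_pos hc]
  · rw [if_neg (fun hm => hc ((hmemps _).mp hm)), if_neg hc]

-- A's per-combo string, characterized positionwise (same right-hand side)
theorem mark_row_a_eq (row : String) (combo : List Int)
    (h : ∀ idx ∈ combo, PySem.Raise.InRange row.toList.length idx) :
    (aCombo row combo).toList =
    row.toList.zipIdx.map
      (fun ci => if ∃ j ∈ combo, PySem.Int.mod j (row.toList.length : Int) = (ci.2 : Int)
        then '#' else qfix ci.1) := by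
  simp only [aCombo]
  rw [PySem.Str.toList_replace]
  rw [show ("?" : String).toList = ['?'] from rfl, show ("." : String).toList = ['.'] from rfl]
  rw [String.toList_ofList, replace_eq]
  apply List.ext_getElem?
  intro k
  rw [List.getElem?_map, foldl_set_getElem? combo row.toList h k, List.getElem?_map,
    List.getElem?_zipIdx]
  by_cases hex : ∃ j ∈ combo, PySem.Int.mod j ((row.toList.length : Nat) : Int) = (k : Int)
  · obtain ⟨j, hj, hjk⟩ := hex
    obtain ⟨a, b⟩ := h j hj
    have hpos : (0:Int) < (row.toList.length : Int) := by omega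
    have hklt : k < row.toList.length := by
      have := PySem.Int.mod_lt j hpos; omega
    rw [if_pos ⟨j, hj, hjk⟩, List.getElem?_eq_getElem hklt]
    simp only [Option.map_some]
    rw [if_pos (by simpa using ⟨j, hj, hjk⟩)]
    simp [qfix]
  · rw [if_neg hex]
    cases hck : row.toList[k]? with
    | none => simp
    | some c =>
      simp only [Option.map_some]
      rw [if_neg (by simpa using hex)]

-- ===== VERDICT (by name: the statement is the Claim_ definition above) =====
theorem get_possible_strings_spec : Claim_equal_get_possible_strings := by
  intro rows index_permutations _hdom hpre
  obtain ⟨hlen, hpre⟩ := hpre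
  unfold Spec_get_possible_strings get_possible_strings get_possible_strings_alt
  simp only [PySem.List.foldl_append_singleton_eq_map, List.nil_append]
  apply List.ext_getElem?
  intro i
  rw [List.getElem?_map, List.getElem?_map]
  by_cases hi : i < rows.length
  · rw [PySem.List.getElem?_pyRange_one,
      if_pos (show i < ((rows.length : Int) - 0).toNat by omega)]
    rw [List.getElem?_eq_getElem (l := rows.zip index_permutations)
      (by rw [List.length_zip]; omega), List.getElem_zip]
    simp only [Option.map_some, Option.some_inj]
    have hiz : (0 : Int) + (i : Nat) = (i : Nat) := by omega
    rw [hiz]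
    have hrowi : PySem.List.pyGetD rows ((i : Nat) : Int) "" = rows[i] := by
      rw [PySem.List.pyGetD_natCast, List.getD_eq_getElem?_getD,
        List.getElem?_eq_getElem hi, Option.getD_some]
    have hpermi : PySem.List.pyGetD index_permutations ((i : Nat) : Int) [] =
        index_permutations[i]'(by omega) := by
      rw [PySem.List.pyGetD_natCast, List.getD_eq_getElem?_getD,
        List.getElem?_eq_getElem (show i < index_permutations.length by omega), Option.getD_some]
    rw [hrowi, hpermi]
    apply List.map_congr_left
    intro combo hcombo
    have hmem : (((i : Nat) : Int), rows[i]) ∈ PySem.List.enumerate rows := by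
      rw [PySem.List.mem_enumerate_iff]
      exact ⟨i, hi, by simp⟩
    have hcpre : ∀ idx ∈ combo, PySem.Raise.InRange rows[i].toList.length idx := by
      intro idx hidx
      exact hpre _ hmem combo (by rw [hpermi]; exact hcombo) idx hidx
    exact String.toList_inj.mp
      ((mark_row_a_eq rows[i] combo hcpre).trans (mark_row_alt_eq rows[i] combo hcpre).symm)
  · rw [PySem.List.getElem?_pyRange_one,
      if_neg (show ¬ i < ((rows.length : Int) - 0).toNat by omega),
      List.getElem?_eq_none (l := rows.zip index_permutations)
        (by rw [List.length_zip]; omega)]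
    simp
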